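-- pv_equiv track=rewrite | github.com/Uchihadi/SoftUniJavaScript | TDAssessment2023/RearrangingBox.py | index_of_value
-- ===== SOURCE A (Python) =====
-- def index_of_value(N, num, B):
--     # Separate odd and even numbers
--     odd = [int(d) for d in str(num) if int(d) % 2 == 1]
--     even = [int(d) for d in str(num) if int(d) % 2 == 0]
--
--     # Sort odd and even numbers
--     odd.sort()
--     even.sort(reverse=True)
--
--     # Combine sorted odd and even numbers
--     box = odd + even
--
--     # Search for B in the box and return its index
--     for i, val in enumerate(box):
--         if val == B:
--             return i+1
-- ===== SOURCE B (Python) =====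
-- def index_of_value(N, num, B):
--     digits = [int(d) for d in str(num)]
--     if B not in digits:
--         return None
--     if B % 2 == 1:
--         return sum(1 for d in digits if d % 2 == 1 and d < B) + 1
--     return (sum(1 for d in digits if d % 2 == 1)
--             + sum(1 for d in digits if d % 2 == 0 and d > B) + 1)
-- ===== Notes on version B (the rewrite author's own statement) =====
-- stated objective: alternative
-- what changed: B replaces A's filter-sort-concatenate-scan (build the odd-ascending/even-descending box and linearly search it) by direct counting: the 1-based first-occurrence index is computed from counts of odd digits below B (resp. all odd digits plus even digits above B), with no sorted box ever built.
import Mathlib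
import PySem

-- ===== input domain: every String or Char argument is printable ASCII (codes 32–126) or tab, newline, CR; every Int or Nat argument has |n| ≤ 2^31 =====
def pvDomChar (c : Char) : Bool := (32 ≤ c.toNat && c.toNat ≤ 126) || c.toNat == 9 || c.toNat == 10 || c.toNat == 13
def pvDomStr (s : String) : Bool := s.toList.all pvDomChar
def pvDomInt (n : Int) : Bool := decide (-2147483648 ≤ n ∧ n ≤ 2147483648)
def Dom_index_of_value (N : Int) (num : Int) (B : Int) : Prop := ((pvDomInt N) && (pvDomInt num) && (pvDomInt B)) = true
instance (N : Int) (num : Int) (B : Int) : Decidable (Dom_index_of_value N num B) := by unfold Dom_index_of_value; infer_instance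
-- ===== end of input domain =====

-- B replaces sort-concatenate-scan by direct counting (no box is built); objective: alternative.
-- Pre_ excludes num < 0, where both Pythons raise ValueError (int('-')).

-- ===== PORT A =====
-- int(d) for a decimal digit char d (all chars of str(num) for num ≥ 0 are digits; exact on Pre_)
def pvDigitA (c : Char) : Int := (c.toNat : Int) - 48
def index_of_value (N : Int) (num : Int) (B : Int) : Option Int :=
  let odd := ((PySem.Int.toChars num).map pvDigitA).filter (fun d => PySem.Int.mod d 2 == 1)
  let even := ((PySem.Int.toChars num).map pvDigitA).filter (fun d => PySem.Int.mod d 2 == 0)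
  let oddS := PySem.List.sorted odd (fun x => x) false
  let evenS := PySem.List.sorted even (fun x => x) true
  let box := oddS ++ evenS
  match PySem.List.index? box B with
  | some i => some ((i : Int) + 1)
  | none => none

-- ===== PORT B =====
def index_of_value_alt (N : Int) (num : Int) (B : Int) : Option Int :=
  let digits := (PySem.Int.toChars num).map pvDigitA
  if B ∈ digits then
    if PySem.Int.mod B 2 == 1 then
      some ((digits.countP (fun d => PySem.Int.mod d 2 == 1 && decide (d < B)) : Int) + 1)
    else
      some ((digits.countP (fun d => PySem.Int.mod d 2 == 1) : Int)
            + (digits.countP (fun d => PySem.Int.mod d 2 == 0 && decide (B < d)) : Int) + 1)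
  else none

-- ===== PRECONDITION & SPEC =====
-- Pre_ excludes exactly num < 0: there str(num) starts with '-' and int('-') raises ValueError in A.
def Pre_index_of_value (N : Int) (num : Int) (B : Int) : Prop := 0 ≤ num
instance (N : Int) (num : Int) (B : Int) : Decidable (Pre_index_of_value N num B) := by unfold Pre_index_of_value; infer_instance
def pvWitness_index_of_value : Int × Int × Int := (4, 20533, 3)
def Spec_index_of_value (N : Int) (num : Int) (B : Int) (out : Option Int) : Prop := out = index_of_value_alt N num B
instance (N : Int) (num : Int) (B : Int) (out : Option Int) : Decidable (Spec_index_of_value N num B out) := by unfold Spec_index_of_value; infer_instance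

-- ===== CLAIM (what is proved, stated in full; the proofs are below) =====
def Claim_equal_index_of_value : Prop := ∀ (N : Int) (num : Int) (B : Int), Dom_index_of_value N num B → Pre_index_of_value N num B → Spec_index_of_value N num B (index_of_value N num B)

-- ===== LEMMAS AND PROOFS =====

-- first index of v in l ++ t when v is not in l
lemma index?_append_right {l t : List Int} {v : Int} (h : v ∉ l) :
    PySem.List.index? (l ++ t) v = (PySem.List.index? t v).map (· + l.length) := by
  induction l with
  | nil => simp [Option.map_id']
  | cons x xs ih =>
    have hx : x ≠ v := fun hxv => h (hxv ▸ List.mem_cons_self)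
    rw [List.cons_append, PySem.List.index?_cons_of_ne _ hx,
        ih (fun hv => h (List.mem_cons_of_mem _ hv))]
    cases PySem.List.index? t v <;> simp <;> omega

-- first index of B in an ascending list = number of elements < B
lemma index_sorted_asc {l : List Int} {B : Int} (h : l.Pairwise (· ≤ ·)) (hB : B ∈ l) :
    PySem.List.index? l B = some (l.countP (fun d => decide (d < B))) := by
  induction l with
  | nil => simp at hB
  | cons x xs ih =>
    rcases List.pairwise_cons.mp h with ⟨hx, hxs⟩
    by_cases hxB : x = B
    · subst hxB
      have h0 : xs.countP (fun d => decide (d < x)) = 0 := by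
        rw [List.countP_eq_zero]
        intro d hd
        simpa using not_lt.mpr (hx d hd)
      rw [PySem.List.index?_cons_self]
      simp [List.countP_cons, h0]
    · have hBxs : B ∈ xs := by cases hB with
        | head => exact absurd rfl hxB
        | tail _ h => exact h
      have hxlt : x < B := lt_of_le_of_ne (hx B hBxs) hxB
      rw [PySem.List.index?_cons_of_ne _ hxB, ih hxs hBxs]
      simp [List.countP_cons, hxlt, Nat.add_comm]

-- first index of B in a descending list = number of elements > B
lemma index_sorted_desc {l : List Int} {B : Int} (h : l.Pairwise (fun a b => b ≤ a)) (hB : B ∈ l) :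
    PySem.List.index? l B = some (l.countP (fun d => decide (B < d))) := by
  induction l with
  | nil => simp at hB
  | cons x xs ih =>
    rcases List.pairwise_cons.mp h with ⟨hx, hxs⟩
    by_cases hxB : x = B
    · subst hxB
      have h0 : xs.countP (fun d => decide (x < d)) = 0 := by
        rw [List.countP_eq_zero]
        intro d hd
        simpa using not_lt.mpr (hx d hd)
      rw [PySem.List.index?_cons_self]
      simp [List.countP_cons, h0]
    · have hBxs : B ∈ xs := by cases hB with
        | head => exact absurd rfl hxB
        | tail _ h => exact h
      have hxgt : B < x := lt_of_le_of_ne (hx B hBxs) (fun e => hxB e.symm)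
      rw [PySem.List.index?_cons_of_ne _ hxB, ih hxs hBxs]
      simp [List.countP_cons, hxgt, Nat.add_comm]

lemma mod2_cases (B : Int) : PySem.Int.mod B 2 = 0 ∨ PySem.Int.mod B 2 = 1 := by
  have h1 := PySem.Int.mod_nonneg B (b := 2) (by norm_num)
  have h2 := PySem.Int.mod_lt B (b := 2) (by norm_num)
  omega

-- the core identity, for an arbitrary list of ints in place of the digit list
lemma core (ds : List Int) (B : Int) :
    (match PySem.List.index?
        (PySem.List.sorted (ds.filter (fun d => PySem.Int.mod d 2 == 1)) (fun x => x) false ++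
         PySem.List.sorted (ds.filter (fun d => PySem.Int.mod d 2 == 0)) (fun x => x) true) B with
     | some i => some ((i : Int) + 1)
     | none => none) =
    (if B ∈ ds then
      if PySem.Int.mod B 2 == 1 then
        some ((ds.countP (fun d => PySem.Int.mod d 2 == 1 && decide (d < B)) : Int) + 1)
      else
        some ((ds.countP (fun d => PySem.Int.mod d 2 == 1) : Int)
              + (ds.countP (fun d => PySem.Int.mod d 2 == 0 && decide (B < d)) : Int) + 1)
     else none) := by
  set po : Int → Bool := fun d => PySem.Int.mod d 2 == 1 with hpo
  set pe : Int → Bool := fun d => PySem.Int.mod d 2 == 0 with hpe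
  set oddS := PySem.List.sorted (ds.filter po) (fun x => x) false with hoS
  set evenS := PySem.List.sorted (ds.filter pe) (fun x => x) true with heS
  have hmemO : ∀ x, x ∈ oddS ↔ (x ∈ ds ∧ po x = true) := by
    intro x; rw [hoS, PySem.List.mem_sorted, List.mem_filter]
  have hmemE : ∀ x, x ∈ evenS ↔ (x ∈ ds ∧ pe x = true) := by
    intro x; rw [heS, PySem.List.mem_sorted, List.mem_filter]
  by_cases hBds : B ∈ ds
  · rcases mod2_cases B with hB0 | hB1
    · -- B even: B is not in oddS, its index comes from evenS shifted by oddS.length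
      have hBnotO : B ∉ oddS := by
        rw [hmemO]
        rintro ⟨-, h⟩
        rw [hpo, beq_iff_eq] at h
        omega
      have hBE : B ∈ evenS := (hmemE B).mpr ⟨hBds, by rw [hpe]; exact beq_iff_eq.mpr hB0⟩
      have hpwE : evenS.Pairwise (fun a b => b ≤ a) := by
        simpa using PySem.List.sorted_pairwise_rev (xs := ds.filter pe) (key := fun x => x)
      have hcE : evenS.countP (fun d => decide (B < d)) =
          ds.countP (fun d => pe d && decide (B < d)) := by
        rw [heS, (PySem.List.sorted_perm _ _ _).countP_eq, List.countP_filter]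
        exact List.countP_congr (fun a _ => by rw [Bool.and_comm])
      have hcO : oddS.length = ds.countP po := by
        rw [hoS, PySem.List.length_sorted, List.countP_eq_length_filter]
      have hBne1 : (PySem.Int.mod B 2 == 1) = false := by
        rw [hB0]; rfl
      rw [index?_append_right hBnotO, index_sorted_desc hpwE hBE]
      rw [if_pos hBds, hBne1, if_neg (by simp)]
      rw [Option.map_some, hcE, hcO]
      simp only [hpo, hpe]
      push_cast
      ring_nf
    · -- B odd: its index comes from oddS
      have hBO : B ∈ oddS := (hmemO B).mpr ⟨hBds, by rw [hpo]; exact beq_iff_eq.mpr hB1⟩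
      have hpwO : oddS.Pairwise (· ≤ ·) := by
        simpa using PySem.List.sorted_pairwise (xs := ds.filter po) (key := fun x => x)
      have hcO : oddS.countP (fun d => decide (d < B)) =
          ds.countP (fun d => po d && decide (d < B)) := by
        rw [hoS, (PySem.List.sorted_perm _ _ _).countP_eq, List.countP_filter]
        exact List.countP_congr (fun a _ => by rw [Bool.and_comm])
      have hB1' : (PySem.Int.mod B 2 == 1) = true := by
        rw [hB1]; rfl
      rw [PySem.List.index?_append_of_mem _ hBO, index_sorted_asc hpwO hBO]
      rw [if_pos hBds, hB1', if_pos rfl, hcO]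
  · -- B not among the digits: not in the box either
    have hno : PySem.List.index? (oddS ++ evenS) B = none := by
      rw [PySem.List.index?_eq_none_iff]
      intro hmem
      rcases List.mem_append.mp hmem with h | h
      · exact hBds ((hmemO B).mp h).1
      · exact hBds ((hmemE B).mp h).1
    rw [hno, if_neg hBds]

-- ===== VERDICT (by name: the statement is the Claim_ definition above) =====
theorem index_of_value_spec : Claim_equal_index_of_value := by
  intro N num B _ _
  unfold Spec_index_of_value index_of_value index_of_value_alt pvDigitA
  exact core ((PySem.Int.toChars num).map (fun c => (c.toNat : Int) - 48)) B
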